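-- pv_equiv track=rewrite | github.com/dlist7/advent-of-code-2022-python | day22a.py | update_west
-- ===== SOURCE A (Python) =====
-- def update_west(monkey_map, r0, c0, r, c):
--     if c > 0:
--         if monkey_map[r][c-1] == '.':
--             return (r,c-1)
--         elif monkey_map[r][c-1] == '#':
--             return (r0,c0)
--         else:
--             return update_west(monkey_map, r0, c0, r, c-1)
--     else:
--         if monkey_map[r][len(monkey_map[r])-1] == '.':
--             return (r,len(monkey_map[r])-1)
--         elif monkey_map[r][len(monkey_map[r])-1] == '#':
--             return (r0,c0)
--         else:
--             return update_west(monkey_map, r0, c0, r, len(monkey_map[r])-1)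
-- ===== SOURCE B (Python) =====
-- def update_west(monkey_map, r0, c0, r, c):
--     row = monkey_map[r]
--     while True:
--         c = c - 1 if c > 0 else len(row) - 1
--         ch = row[c]
--         if ch == '.':
--             return (r, c)
--         if ch == '#':
--             return (r0, c0)
-- ===== Notes on version B (the rewrite author's own statement) =====
-- stated objective: idiomatic
-- what changed: Replaces the self-recursion (which duplicates the scan/wrap branches and hits Python's recursion limit on long walks) with a single iterative while loop that computes the next column, reads the row once, and returns on '.' or '#'.
import Mathlib
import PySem

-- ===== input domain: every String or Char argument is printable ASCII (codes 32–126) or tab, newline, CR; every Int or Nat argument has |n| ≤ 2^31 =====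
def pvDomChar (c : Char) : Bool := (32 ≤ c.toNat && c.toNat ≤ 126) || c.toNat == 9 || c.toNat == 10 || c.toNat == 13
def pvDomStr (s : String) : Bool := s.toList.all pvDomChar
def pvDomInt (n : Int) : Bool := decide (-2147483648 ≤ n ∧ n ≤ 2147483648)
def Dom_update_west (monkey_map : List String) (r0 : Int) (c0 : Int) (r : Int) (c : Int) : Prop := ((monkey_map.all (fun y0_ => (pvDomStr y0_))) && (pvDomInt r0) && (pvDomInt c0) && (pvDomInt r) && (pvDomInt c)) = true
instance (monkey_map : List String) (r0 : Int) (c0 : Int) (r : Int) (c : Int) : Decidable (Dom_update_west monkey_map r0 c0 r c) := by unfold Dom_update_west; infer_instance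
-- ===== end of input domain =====

-- B replaces A's self-recursion (with its duplicated scan/wrap branches) by one iterative
-- loop that reads the row once and computes the next column each step (objective: idiomatic).


-- ===== PORT A =====
-- monkey_map[r][i]  (Python indexing, negative from the end; none = IndexError, outside Pre_)
def pvCharAt (monkey_map : List String) (r : Int) (i : Int) : Option Char :=
  (PySem.List.pyGet? monkey_map r).bind fun row => PySem.Str.pyGet? row i

-- len(monkey_map[r])  (0 if r is out of range, which is outside Pre_)
def pvRowLen (monkey_map : List String) (r : Int) : Int :=
  ((PySem.List.pyGet? monkey_map r).map (fun row => (row.toList.length : Int))).getD 0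

-- A's recursion, step for step; fuel only makes it total (exhaustion is unreachable under Pre_,
-- where Python A returns: the dummy (r0, c0) at fuel 0 is never the claimed value there).
def update_west_go (monkey_map : List String) (r0 : Int) (c0 : Int) (r : Int) :
    Nat → Int → Int × Int
  | 0, _ => (r0, c0)
  | fuel + 1, c =>
    if c > 0 then
      if pvCharAt monkey_map r (c - 1) = some '.' then (r, c - 1)
      else if pvCharAt monkey_map r (c - 1) = some '#' then (r0, c0)
      else update_west_go monkey_map r0 c0 r fuel (c - 1)
    else
      if pvCharAt monkey_map r (pvRowLen monkey_map r - 1) = some '.' then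
        (r, pvRowLen monkey_map r - 1)
      else if pvCharAt monkey_map r (pvRowLen monkey_map r - 1) = some '#' then (r0, c0)
      else update_west_go monkey_map r0 c0 r fuel (pvRowLen monkey_map r - 1)

def update_west (monkey_map : List String) (r0 : Int) (c0 : Int) (r : Int) (c : Int) : Int × Int :=
  update_west_go monkey_map r0 c0 r (c.toNat + 2 * (pvRowLen monkey_map r).toNat + 2) c

-- ===== PORT B =====
-- B's while-True loop over the row fetched once: next column, then the two early returns.
-- Same fuel bound as A's port makes the loop total; exhaustion is unreachable under Pre_.
def update_west_alt_loop (row : List Char) (r0 : Int) (c0 : Int) (r : Int) :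
    Nat → Int → Int × Int
  | 0, _ => (r0, c0)
  | fuel + 1, c =>
    let nc : Int := if c > 0 then c - 1 else (row.length : Int) - 1
    match PySem.List.pyGet? row nc with
    | some '.' => (r, nc)
    | some '#' => (r0, c0)
    | _ => update_west_alt_loop row r0 c0 r fuel nc

def update_west_alt (monkey_map : List String) (r0 : Int) (c0 : Int) (r : Int) (c : Int) :
    Int × Int :=
  match PySem.List.pyGet? monkey_map r with
  | none => (r0, c0)   -- IndexError in Python, outside Pre_
  | some row => update_west_alt_loop row.toList r0 c0 r
      (c.toNat + 2 * row.toList.length + 2) c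

-- ===== PRECONDITION & SPEC =====
-- Pre_ = exactly the inputs on which Python A returns: the row index is in Python range,
-- the row is nonempty, c ≤ len(row) (larger c indexes past the row: IndexError), and the
-- row contains '.' or '#' (otherwise the recursion never terminates: RecursionError).
def Pre_update_west (monkey_map : List String) (r0 : Int) (c0 : Int) (r : Int) (c : Int) : Prop :=
  (PySem.List.pyGet? monkey_map r).isSome = true ∧
  ∀ row ∈ (PySem.List.pyGet? monkey_map r).toList,
    1 ≤ row.toList.length ∧ c ≤ (row.toList.length : Int) ∧
    ('.' ∈ row.toList ∨ '#' ∈ row.toList)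
instance (monkey_map : List String) (r0 : Int) (c0 : Int) (r : Int) (c : Int) : Decidable (Pre_update_west monkey_map r0 c0 r c) := by unfold Pre_update_west; infer_instance

def pvWitness_update_west : List String × Int × Int × Int × Int := (["..#."], 0, 0, 0, 3)

def Spec_update_west (monkey_map : List String) (r0 : Int) (c0 : Int) (r : Int) (c : Int) (out : Int × Int) : Prop := out = update_west_alt monkey_map r0 c0 r c
instance (monkey_map : List String) (r0 : Int) (c0 : Int) (r : Int) (c : Int) (out : Int × Int) : Decidable (Spec_update_west monkey_map r0 c0 r c out) := by unfold Spec_update_west; infer_instance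

-- ===== CLAIM (what is proved, stated in full; the proofs are below) =====
def Claim_equal_update_west : Prop := ∀ (monkey_map : List String) (r0 : Int) (c0 : Int) (r : Int) (c : Int), Dom_update_west monkey_map r0 c0 r c → Pre_update_west monkey_map r0 c0 r c → Spec_update_west monkey_map r0 c0 r c (update_west monkey_map r0 c0 r c)

-- ===== LEMMAS AND PROOFS =====

theorem pvCharAt_eq (monkey_map : List String) (r : Int) (row : String)
    (h : PySem.List.pyGet? monkey_map r = some row) (i : Int) :
    pvCharAt monkey_map r i = PySem.List.pyGet? row.toList i := by
  simp [pvCharAt, h]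

theorem pvRowLen_eq (monkey_map : List String) (r : Int) (row : String)
    (h : PySem.List.pyGet? monkey_map r = some row) :
    pvRowLen monkey_map r = (row.toList.length : Int) := by
  simp [pvRowLen, h]

-- with the row in hand, A's recursion and B's loop take the same step at every fuel level
theorem go_eq_loop (monkey_map : List String) (r0 c0 r : Int) (row : String)
    (h : PySem.List.pyGet? monkey_map r = some row) :
    ∀ (fuel : Nat) (c : Int),
      update_west_go monkey_map r0 c0 r fuel c =
      update_west_alt_loop row.toList r0 c0 r fuel c := by
  intro fuel
  induction fuel with
  | zero => intro c; rfl
  | succ n ih =>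
    intro c
    by_cases hc : c > 0
    · simp only [update_west_go, update_west_alt_loop, hc, if_pos,
        pvCharAt_eq monkey_map r row h]
      cases hg : PySem.List.pyGet? row.toList (c - 1) with
      | none => simp [ih]
      | some ch =>
        by_cases h1 : ch = '.'
        · simp [h1]
        · by_cases h2 : ch = '#'
          · simp [h2]
          · simp [h1, h2, ih]
    · simp only [update_west_go, update_west_alt_loop, hc,
        pvCharAt_eq monkey_map r row h, pvRowLen_eq monkey_map r row h]
      cases hg : PySem.List.pyGet? row.toList ((row.toList.length : Int) - 1) with
      | none => simp only [String.length_toList] at hg ⊢; simp [hg, ih]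
      | some ch =>
        by_cases h1 : ch = '.'
        · simp only [String.length_toList] at hg ⊢; simp [hg, h1]
        · by_cases h2 : ch = '#'
          · simp only [String.length_toList] at hg ⊢; simp [hg, h1, h2]
          · simp only [String.length_toList] at hg ⊢; simp [hg, h1, h2, ih]

-- ===== VERDICT (by name: the statement is the Claim_ definition above) =====
theorem update_west_spec : Claim_equal_update_west := by
  intro monkey_map r0 c0 r c _hDom _hPre
  unfold Spec_update_west update_west update_west_alt
  cases h : PySem.List.pyGet? monkey_map r with
  | none =>
    exfalso
    have := _hPre.1
    rw [h] at this
    simp at this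
  | some row =>
    rw [pvRowLen_eq monkey_map r row h]
    simpa using go_eq_loop monkey_map r0 c0 r row h (c.toNat + 2 * row.toList.length + 2) c
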